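-- pv_equiv track=rewrite | github.com/C4rnivore/QR | Qr/QrService.py | fill_data_to_fit_version_size
-- ===== SOURCE A (Python) =====
-- def fill_data_to_fit_version_size(data, steps):
--     fillers = ['11101100', '00010001']
--     temp = data
--     for i in range(0,steps):
--         if i == 0:
--             temp+=fillers[0]
--         else:
--             temp+=fillers[i % 2]
--     return temp
-- ===== SOURCE B (Python) =====
-- def fill_data_to_fit_version_size(data, steps):
--     n = max(steps, 0)
--     pattern = '11101100' + '00010001'
--     result = data + pattern * (n // 2)
--     if n % 2 == 1:
--         result += '11101100'
--     return result
-- ===== Notes on version B (the rewrite author's own statement) =====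
-- stated objective: simpler
-- what changed: Replaces the per-step loop that indexes a filler list by i %% 2 with a closed-form block repetition: clamp steps to >= 0, append the 16-char pattern steps//2 times and one extra '11101100' if steps is odd.
import Mathlib
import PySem

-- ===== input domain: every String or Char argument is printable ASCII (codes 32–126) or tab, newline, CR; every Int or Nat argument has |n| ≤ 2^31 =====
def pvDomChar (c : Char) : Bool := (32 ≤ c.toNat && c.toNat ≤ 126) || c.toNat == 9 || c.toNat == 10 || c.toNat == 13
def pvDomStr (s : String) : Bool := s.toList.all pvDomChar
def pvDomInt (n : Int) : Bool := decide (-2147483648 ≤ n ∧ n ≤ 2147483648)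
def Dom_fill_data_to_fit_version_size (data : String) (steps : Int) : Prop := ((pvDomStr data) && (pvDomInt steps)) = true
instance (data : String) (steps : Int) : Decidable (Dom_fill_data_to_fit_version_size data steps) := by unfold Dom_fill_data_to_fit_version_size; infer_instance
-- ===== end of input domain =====

-- B replaces A's per-step loop over a filler list with a closed-form block repetition (simpler).

-- ===== PORT A =====
-- literal port of A: loop over range(0, steps), appending fillers[0] when i == 0 and fillers[i % 2] otherwise
-- (fillers[i % 2] is ported as pyGetD with default "": inside the loop i ≥ 0, so i % 2 is always a valid index and Python never raises)
def fill_data_to_fit_version_size (data : String) (steps : Int) : String :=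
  let fillers : List String := ["11101100", "00010001"]
  (PySem.List.pyRange 0 steps 1).foldl
    (fun temp i =>
      if i == 0 then temp ++ "11101100"
      else temp ++ PySem.List.pyGetD fillers (PySem.Int.mod i 2) "")
    data

-- ===== PORT B =====
-- literal port of Source B: n = max(steps, 0); data + pattern * (n // 2), plus '11101100' if n is odd
-- (n ≥ 0, so Python's n // 2 and n % 2 are Nat division/mod, and pattern * (n // 2) is replication)
def fill_data_to_fit_version_size_alt (data : String) (steps : Int) : String :=
  let n : Nat := (max steps 0).toNat
  let pattern : String := "11101100" ++ "00010001"
  let result : String := data ++ String.join (List.replicate (n / 2) pattern)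
  if n % 2 == 1 then result ++ "11101100" else result

-- ===== PRECONDITION & SPEC =====
def Spec_fill_data_to_fit_version_size (data : String) (steps : Int) (out : String) : Prop := out = fill_data_to_fit_version_size_alt data steps
instance (data : String) (steps : Int) (out : String) : Decidable (Spec_fill_data_to_fit_version_size data steps out) := by unfold Spec_fill_data_to_fit_version_size; infer_instance

-- ===== CLAIM (what is proved, stated in full; the proofs are below) =====
def Claim_equal_fill_data_to_fit_version_size : Prop := ∀ (data : String) (steps : Int), Dom_fill_data_to_fit_version_size data steps → Spec_fill_data_to_fit_version_size data steps (fill_data_to_fit_version_size data steps)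

-- ===== LEMMAS AND PROOFS =====

theorem pvJoin_cons (p : String) (l : List String) : String.join (p :: l) = p ++ String.join l := by
  simp only [String.join, List.foldl]
  induction l generalizing p with
  | nil => simp
  | cons q t ih =>
    simp only [List.foldl, String.empty_append] at *
    rw [ih (p ++ q), ih q, String.append_assoc]

theorem pvJoin_append (a b : List String) : String.join (a ++ b) = String.join a ++ String.join b := by
  induction a with
  | nil => simp [String.join]
  | cons p t ih => rw [List.cons_append, pvJoin_cons, ih, pvJoin_cons, String.append_assoc]

theorem pvJoin_rep_succ (k : Nat) (p : String) :
    String.join (List.replicate (k+1) p) = String.join (List.replicate k p) ++ p := by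
  rw [List.replicate_succ', pvJoin_append]
  simp [String.join]

-- the tail B appends after n loop iterations of A
def pvRep (n : Nat) : String :=
  String.join (List.replicate (n / 2) ("11101100" ++ "00010001")) ++
    (if n % 2 == 1 then "11101100" else "")

-- one loop step of A extends the closed form by the right filler
theorem pvRep_succ (n : Nat) : pvRep (n + 1) =
    pvRep n ++ (if n % 2 = 0 then "11101100" else "00010001") := by
  rcases Nat.even_or_odd n with ⟨k, hk⟩ | ⟨k, hk⟩
  · have h1 : (n + 1) / 2 = n / 2 := by omega
    have h2 : (n + 1) % 2 = 1 := by omega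
    have h3 : n % 2 = 0 := by omega
    simp [pvRep, h1, h2, h3, String.append_empty]
  · have h1 : (n + 1) / 2 = n / 2 + 1 := by omega
    have h2 : (n + 1) % 2 = 0 := by omega
    have h3 : n % 2 = 1 := by omega
    simp [pvRep, h1, h2, h3, pvJoin_rep_succ, String.append_empty, String.append_assoc]

-- A's fold over range(0, n) appended to data is exactly data ++ pvRep n
theorem pvLoop_eq (n : Nat) (data : String) :
    (PySem.List.pyRange 0 (n : Int) 1).foldl
      (fun temp i =>
        if i == 0 then temp ++ "11101100"
        else temp ++ PySem.List.pyGetD ["11101100", "00010001"] (PySem.Int.mod i 2) "")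
      data = data ++ pvRep n := by
  induction n with
  | zero => simp [PySem.List.pyRange_one_eq_nil, pvRep, String.join, String.append_empty]
  | succ m ih =>
    have h : ((m + 1 : Nat) : Int) = (m : Int) + 1 := by push_cast; ring
    rw [h, PySem.List.pyRange_one_succ_right (by positivity), List.foldl_append]
    simp only [List.foldl, ih]
    rcases Nat.eq_zero_or_pos m with hm | hm
    · subst hm
      simp [pvRep, String.join, String.append_empty]
    · have hne : (((m : Int)) == 0) = false := by
        simp only [beq_eq_false_iff_ne, ne_eq, Int.natCast_eq_zero]
        omega
      rw [if_neg (by simp [hne])]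
      have hmod : PySem.Int.mod (m : Int) 2 = ((m % 2 : Nat) : Int) := by
        exact_mod_cast PySem.Int.mod_natCast m 2
      rw [hmod, PySem.List.pyGetD_natCast, pvRep_succ, ← String.append_assoc]
      rcases Nat.mod_two_eq_zero_or_one m with h2 | h2 <;> simp [h2]

-- ===== VERDICT (by name: the statement is the Claim_ definition above) =====
theorem fill_data_to_fit_version_size_spec : Claim_equal_fill_data_to_fit_version_size := by
  intro data steps _
  unfold Spec_fill_data_to_fit_version_size fill_data_to_fit_version_size fill_data_to_fit_version_size_alt
  have hn : PySem.List.pyRange 0 steps 1 = PySem.List.pyRange 0 (steps.toNat : Int) 1 := by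
    rcases le_or_gt steps 0 with h | h
    · rw [PySem.List.pyRange_one_eq_nil h, PySem.List.pyRange_one_eq_nil (by omega)]
    · congr 1; omega
  have hmax : (max steps 0).toNat = steps.toNat := by omega
  simp only [hn, hmax]
  rw [pvLoop_eq steps.toNat data, pvRep]
  rcases Nat.mod_two_eq_zero_or_one steps.toNat with h2 | h2 <;>
    simp [h2, String.append_empty, String.append_assoc]
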